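-- pv_equiv track=rewrite | github.com/Abhik6/Python | Coding Practice/12. Hashmaps/count_even_odd.py | count_odd_even_occurrences
-- ===== SOURCE A (Python) =====
-- def count_odd_even_occurrences(arr):
--     """
--     Function to count the number of elements that occur an odd number of times
--     and the number of elements that occur an even number of times.
--
--     :param ARR: List[int] -> The input list of integers
--     :return: Tuple[int, int] -> A tuple containing two values:
--              - The number of elements with odd occurrences
--              - The number of elements with even occurrences
--     """
--
--     n = len(arr)
--     count_freq = {}
--     for i in range(n):
--         count_freq[arr[i]] = count_freq.get(arr[i],0) + 1
--         # if count_freq.get(arr[i]) is not None: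
--         #     count_freq[arr[i]] += 1
--         # else:
--         #     count_freq[arr[i]] = 1
--
--     even = 0
--     odd = 0
--     for elem in count_freq.keys():
--         if count_freq[elem] % 2 == 0:
--             even+=1
--         else:
--             odd+=1
--
--     return odd, even
-- ===== SOURCE B (Python) =====
-- def count_odd_even_occurrences(arr):
--     # One pass: track parity by set-membership toggling; no frequency counts stored.
--     seen = set()
--     odd_set = set()
--     for x in arr:
--         seen.add(x)
--         if x in odd_set:
--             odd_set.discard(x)
--         else:
--             odd_set.add(x)
--     odd = len(odd_set)
--     return odd, len(seen) - odd
-- ===== Notes on version B (the rewrite author's own statement) =====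
-- stated objective: alternative
-- what changed: Replaced the count-then-classify scheme (build a frequency dict in one loop, then a second loop over its keys testing count % 2) with a single pass that never stores counts: parity is tracked by toggling membership in an odd-parity set alongside a seen set, and the answer is read off the two set sizes.
import Mathlib
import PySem

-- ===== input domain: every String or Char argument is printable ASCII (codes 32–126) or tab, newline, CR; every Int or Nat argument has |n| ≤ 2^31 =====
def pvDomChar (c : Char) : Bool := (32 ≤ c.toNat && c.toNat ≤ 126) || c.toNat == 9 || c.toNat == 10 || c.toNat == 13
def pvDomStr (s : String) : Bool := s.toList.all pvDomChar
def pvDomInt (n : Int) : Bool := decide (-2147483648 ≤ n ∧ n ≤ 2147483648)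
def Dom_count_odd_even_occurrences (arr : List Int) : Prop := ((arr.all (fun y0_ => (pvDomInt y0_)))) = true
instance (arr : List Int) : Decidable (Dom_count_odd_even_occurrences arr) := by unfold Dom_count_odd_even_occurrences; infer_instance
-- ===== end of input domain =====

-- B replaces A's count-then-classify (frequency dict + second loop over keys) with a single
-- pass toggling membership in an odd-parity set; alternative decomposition, same asymptotic cost.

-- ===== PORT A =====
-- A's first loop: count_freq[arr[i]] = count_freq.get(arr[i], 0) + 1 for i in range(n)
def aCountFreq (arr : List Int) : PySem.Dict Int Int :=
  (PySem.List.pyRange 0 (PySem.List.len arr)).foldl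
    (fun d i => d.insert (PySem.List.pyGetD arr i 0) (d.getD (PySem.List.pyGetD arr i 0) 0 + 1))
    PySem.Dict.empty

-- A's second loop: accumulate (even, odd) over count_freq.keys()
def aClassify (count_freq : PySem.Dict Int Int) : Int × Int :=
  count_freq.keys.foldl
    (fun p elem =>
      if PySem.Int.mod (count_freq.getD elem 0) 2 == 0 then (p.1 + 1, p.2) else (p.1, p.2 + 1))
    (0, 0)

def count_odd_even_occurrences (arr : List Int) : Int × Int :=
  match aClassify (aCountFreq arr) with
  | (even, odd) => (odd, even)

-- ===== PORT B =====
-- loop body of B: add x to seen, toggle x in the odd-parity set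
def bStep (p : PySem.Set Int × PySem.Set Int) (x : Int) : PySem.Set Int × PySem.Set Int :=
  (p.1.add x, if p.2.contains x then p.2.discard x else p.2.add x)

def count_odd_even_occurrences_alt (arr : List Int) : Int × Int :=
  match arr.foldl bStep (PySem.Set.empty, PySem.Set.empty) with
  | (seen, odd_set) => (PySem.Set.len odd_set, PySem.Set.len seen - PySem.Set.len odd_set)

-- ===== PRECONDITION & SPEC =====
def Spec_count_odd_even_occurrences (arr : List Int) (out : Int × Int) : Prop := out = count_odd_even_occurrences_alt arr
instance (arr : List Int) (out : Int × Int) : Decidable (Spec_count_odd_even_occurrences arr out) := by unfold Spec_count_odd_even_occurrences; infer_instance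

-- ===== CLAIM (what is proved, stated in full; the proofs are below) =====
def Claim_equal_count_odd_even_occurrences : Prop := ∀ (arr : List Int), Dom_count_odd_even_occurrences arr → Spec_count_odd_even_occurrences arr (count_odd_even_occurrences arr)

-- ===== LEMMAS AND PROOFS =====

-- the parity predicate both results are counted by
def oddCnt (arr : List Int) (k : Int) : Bool := arr.count k % 2 == 1

-- A's classification loop over a pair accumulator counts the predicate and its negation
theorem foldl_pair_count (p : Int → Bool) (l : List Int) (e o : Int) :
    l.foldl (fun q k => if p k then (q.1 + 1, q.2) else (q.1, q.2 + 1)) (e, o)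
      = (e + (l.countP p : Int), o + (l.countP (fun k => !p k) : Int)) := by
  induction l generalizing e o with
  | nil => simp
  | cons x xs ih => by_cases h : p x <;> simp [h, ih] <;> omega

-- a list splits into the elements satisfying a predicate and those refuting it
theorem countP_split (p : Int → Bool) (l : List Int) :
    l.countP p + l.countP (fun k => !p k) = l.length := by
  induction l with
  | nil => simp
  | cons x xs ih => by_cases h : p x <;> simp [h] <;> omega

-- B's loop invariant: seen is a nodup list with the membership of the processed prefix,
-- odd is a nodup list holding exactly the elements with odd count in the processed prefix
theorem bLoop_inv (l : List Int) (pre : List Int) (seen odd : PySem.Set Int)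
    (hsn : seen.Nodup) (hsm : ∀ y, y ∈ seen ↔ y ∈ pre)
    (hon : odd.Nodup) (hom : ∀ y, y ∈ odd ↔ pre.count y % 2 = 1) :
    (l.foldl bStep (seen, odd)).1.Nodup ∧
    (∀ y, y ∈ (l.foldl bStep (seen, odd)).1 ↔ y ∈ pre ++ l) ∧
    (l.foldl bStep (seen, odd)).2.Nodup ∧
    (∀ y, y ∈ (l.foldl bStep (seen, odd)).2 ↔ (pre ++ l).count y % 2 = 1) := by
  induction l generalizing pre seen odd with
  | nil => exact ⟨hsn, by simpa using hsm, hon, by simpa using hom⟩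
  | cons x xs ih =>
    simp only [List.foldl_cons]
    have hstep : bStep (seen, odd) x
        = (seen.add x, if odd.contains x then odd.discard x else odd.add x) := rfl
    have hsn' : (seen.add x).Nodup := PySem.Set.nodup_add seen x hsn
    have hsm' : ∀ y, y ∈ seen.add x ↔ y ∈ pre ++ [x] := by
      intro y; simp [PySem.Set.mem_add, hsm y, or_comm]
    have hcontains : ∀ y, odd.contains y = true ↔ y ∈ odd := by
      intro y; simp [PySem.Set.contains]
    have hon' : (if odd.contains x then odd.discard x else odd.add x).Nodup := by
      split
      · exact PySem.Set.nodup_discard odd x hon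
      · exact PySem.Set.nodup_add odd x hon
    have hom' : ∀ y, (y ∈ if odd.contains x then odd.discard x else odd.add x)
        ↔ (pre ++ [x]).count y % 2 = 1 := by
      intro y
      by_cases hy : y = x
      · subst hy
        have hc : (pre ++ [y]).count y = pre.count y + 1 := by
          simp [List.count_append]
        rw [hc]
        by_cases hx : y ∈ odd
        · have h1 := (hom y).mp hx
          rw [if_pos ((hcontains y).mpr hx)]
          simp only [PySem.Set.mem_discard]
          exact ⟨fun ⟨_, hne⟩ => absurd rfl hne, fun h => absurd h (by omega)⟩
        · have h1 : ¬ pre.count y % 2 = 1 := fun h => hx ((hom y).mpr h)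
          have hne : odd.contains y = false := by
            by_contra hcc
            exact hx ((hcontains y).mp (by simpa using hcc))
          rw [if_neg (fun hcc => hx ((hcontains y).mp hcc))]
          simp only [PySem.Set.mem_add]
          exact ⟨fun _ => by omega, fun _ => by simp⟩
      · have hc : (pre ++ [x]).count y = pre.count y := by
          have h0 : List.count y [x] = 0 := List.count_eq_zero.mpr (by simp [hy])
          simp [List.count_append, h0]
        rw [hc]
        have hmem : (y ∈ if odd.contains x then odd.discard x else odd.add x) ↔ y ∈ odd := by
          split
          · simp [PySem.Set.mem_discard, hy]
          · simp [PySem.Set.mem_add, hy]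
        rw [hmem, hom y]
    have hpp : pre ++ x :: xs = (pre ++ [x]) ++ xs := by simp
    rw [hstep, hpp]
    exact ih (pre ++ [x]) (seen.add x) _ hsn' hsm' hon' hom'

-- two nodup lists with the same membership have the same length
theorem len_eq_of_nodup_mem (s t : List Int) (hs : s.Nodup) (ht : t.Nodup)
    (h : ∀ y, y ∈ s ↔ y ∈ t) : s.length = t.length :=
  ((List.perm_ext_iff_of_nodup hs ht).mpr h).length_eq

-- the parity test A performs on the stored count agrees with oddCnt
theorem mod_count_eq (arr : List Int) (k : Int) :
    (PySem.Int.mod ((arr.count k : Int)) 2 == 0) = !oddCnt arr k := by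
  rw [PySem.Int.mod_eq_emod_of_pos (by norm_num : (0:Int) < 2)]
  by_cases h : arr.count k % 2 = 1
  · have h2 : ((arr.count k : Int)) % 2 = 1 := by omega
    simp [oddCnt, h, h2]
  · have h2 : ((arr.count k : Int)) % 2 = 0 := by omega
    simp [oddCnt, h, h2]

-- characterisation of A's result
theorem A_eq (arr : List Int) :
    count_odd_even_occurrences arr
      = (((PySem.Set.ofList arr).countP (oddCnt arr) : Int),
         ((PySem.Set.ofList arr).countP (fun k => !oddCnt arr k) : Int)) := by
  have hfreq : aCountFreq arr = PySem.Dict.counter arr := by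
    unfold aCountFreq
    have h1 := PySem.List.foldl_pyRange_pyGetD arr 0
      (fun (d : PySem.Dict Int Int) x => d.insert x (d.getD x 0 + 1)) PySem.Dict.empty (le_refl 0)
    simp only [Int.toNat_zero, List.drop_zero] at h1
    exact h1.trans (PySem.Dict.foldl_insert_getD_add_one_eq_counter arr)
  have hcl : aClassify (aCountFreq arr)
      = (((PySem.Set.ofList arr).countP (fun k => !oddCnt arr k) : Int),
         ((PySem.Set.ofList arr).countP (oddCnt arr) : Int)) := by
    unfold aClassify
    rw [hfreq]
    simp only [PySem.Dict.keys_counter, PySem.Dict.getD_counter]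
    rw [show (fun (p : Int × Int) elem =>
          if (PySem.Int.mod ((arr.count elem : Int)) 2 == 0) = true then (p.1 + 1, p.2) else (p.1, p.2 + 1))
        = (fun (p : Int × Int) elem =>
          if (!oddCnt arr elem) = true then (p.1 + 1, p.2) else (p.1, p.2 + 1)) by
          funext p elem; rw [mod_count_eq]]
    rw [foldl_pair_count]
    simp
  unfold count_odd_even_occurrences
  rw [hcl]

-- characterisation of B's result
theorem B_eq (arr : List Int) :
    count_odd_even_occurrences_alt arr
      = (((PySem.Set.ofList arr).countP (oddCnt arr) : Int),
         ((PySem.Set.ofList arr).countP (fun k => !oddCnt arr k) : Int)) := by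
  obtain ⟨hsn, hsm, hon, hom⟩ :=
    bLoop_inv arr [] PySem.Set.empty PySem.Set.empty (by simp [PySem.Set.empty])
      (by simp [PySem.Set.empty]) (by simp [PySem.Set.empty]) (by simp [PySem.Set.empty])
  unfold count_odd_even_occurrences_alt
  set st := arr.foldl bStep (PySem.Set.empty, PySem.Set.empty) with hst
  have hS := PySem.Set.nodup_ofList arr (α := Int)
  have hOdd : st.2.length = (PySem.Set.ofList arr).countP (oddCnt arr) := by
    rw [List.countP_eq_length_filter]
    apply len_eq_of_nodup_mem _ _ hon (hS.filter _)
    intro y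
    rw [hom y]
    simp only [List.mem_filter, PySem.Set.mem_ofList, List.nil_append, oddCnt]
    constructor
    · intro h
      refine ⟨?_, by simp [h]⟩
      rcases Nat.eq_zero_or_pos (arr.count y) with h0 | h0
      · omega
      · exact List.count_pos_iff.mp h0
    · intro ⟨_, h⟩; simpa using h
  have hSeen : st.1.length = (PySem.Set.ofList arr).length := by
    apply len_eq_of_nodup_mem _ _ hsn hS
    intro y; rw [hsm y, PySem.Set.mem_ofList]; simp
  have hsplit := countP_split (oddCnt arr) (PySem.Set.ofList arr)
  rw [show st = (st.1, st.2) from rfl]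
  simp only [PySem.Set.len, hOdd, hSeen]
  rw [Prod.mk.injEq]
  exact ⟨rfl, by omega⟩

-- ===== VERDICT (by name: the statement is the Claim_ definition above) =====
theorem count_odd_even_occurrences_spec : Claim_equal_count_odd_even_occurrences := by
  intro arr _
  unfold Spec_count_odd_even_occurrences
  rw [A_eq, B_eq]
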